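-- pv_equiv track=rewrite | github.com/xxKeyaxx/DVWA-OWASP-Tests | Configuration and Deployment Management Testing (OTG-CONFIG)/File Extensions Handling for Sensitive Information (OTG-CONFIG-003)/File Extensions Handling for Sensitive Information Code.py | is_content_interesting
-- ===== SOURCE A (Python) =====
-- def is_content_interesting(content, url):
--     """Determine if the content is potentially sensitive"""
--     content_lower = content.lower()
--
--     # Skip common non-sensitive pages
--     if any(skip_phrase in content_lower for skip_phrase in [
--         'welcome to nginx',
--         'it works!',
--         'apache http server',
--         'index of /',
--         'directory listing for',
--         'default web page',
--         '<title>index of',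
--         '404 not found',
--         '403 forbidden',
--         'forbidden'
--     ]):
--         return False, 'Low'
--
--     # Check for phpinfo pages (High Risk)
--     if 'phpinfo()' in content or 'PHP Version' in content or '<h1 class="p">PHP Version' in content:
--         return True, 'High'
--
--     # Check for sensitive content
--     sensitive_indicators = [
--         # Configuration/credentials
--         ('password', 'High'),
--         ('passwd', 'High'),
--         ('secret', 'High'),
--         ('api_key', 'High'),
--         ('token', 'Medium'),
--         ('database', 'Medium'),
--         ('mysql', 'Medium'),
--         ('postgresql', 'Medium'),
--         ('mongodb', 'Medium'),
--         ('connection', 'Medium'),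
--         # Source code indicators
--         ('<?php', 'High'),
--         ('mysql_connect', 'High'),
--         ('mysqli_connect', 'High'),
--         ('pdo(', 'Medium'),
--         ('new mysqli', 'Medium'),
--         # File content indicators
--         ('create table', 'Medium'),  # SQL
--         ('insert into', 'Medium'),   # SQL
--         ('select *', 'Low'),         # Generic SQL
--     ]
--
--     # Check for high-value file types that are always interesting when accessible
--     always_interesting_extensions = [
--         '.env', '.sql', '.log', '.bak', '.backup', '.config', '.key'
--     ]
--
--     # If it's an always-interesting file type, flag it regardless of content
--     for ext in always_interesting_extensions:
--         if ext in url.lower():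
--             return True, 'High'
--
--     # Check for sensitive indicators in content
--     highest_risk = 'Low'
--     found_sensitive = False
--
--     for indicator, risk_level in sensitive_indicators:
--         if indicator in content_lower:
--             found_sensitive = True
--             if risk_level == 'High':
--                 return True, 'High'
--             elif risk_level == 'Medium' and highest_risk == 'Low':
--                 highest_risk = 'Medium'
--
--     return found_sensitive, highest_risk
-- ===== SOURCE B (Python) =====
-- _SKIP_PHRASES = [
--     'welcome to nginx',
--     'it works!',
--     'apache http server',
--     'index of /',
--     'directory listing for',
--     'default web page',
--     '<title>index of',
--     '404 not found',
--     '403 forbidden',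
--     'forbidden',
-- ]
--
-- _PHP_MARKERS = ['phpinfo()', 'PHP Version', '<h1 class="p">PHP Version']
--
-- _ALWAYS_INTERESTING_EXTENSIONS = [
--     '.env', '.sql', '.log', '.bak', '.backup', '.config', '.key'
-- ]
--
-- # sensitive indicators partitioned by risk tier (original order preserved)
-- _HIGH = ['password', 'passwd', 'secret', 'api_key',
--          '<?php', 'mysql_connect', 'mysqli_connect']
-- _MEDIUM = ['token', 'database', 'mysql', 'postgresql', 'mongodb',
--            'connection', 'pdo(', 'new mysqli', 'create table', 'insert into']
-- _LOW = ['select *']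
--
--
-- def _contains_any(haystack, needles):
--     return any(n in haystack for n in needles)
--
--
-- def is_content_interesting(content, url):
--     """Determine if the content is potentially sensitive"""
--     content_lower = content.lower()
--     if _contains_any(content_lower, _SKIP_PHRASES):
--         return False, 'Low'
--     if _contains_any(content, _PHP_MARKERS):  # case-sensitive, raw content
--         return True, 'High'
--     if _contains_any(url.lower(), _ALWAYS_INTERESTING_EXTENSIONS):
--         return True, 'High'
--     if _contains_any(content_lower, _HIGH):
--         return True, 'High'
--     if _contains_any(content_lower, _MEDIUM):
--         return True, 'Medium'
--     return _contains_any(content_lower, _LOW), 'Low'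
-- ===== Notes on version B (the rewrite author's own statement) =====
-- stated objective: simpler
-- what changed: The single accumulator loop over (indicator, risk) pairs with found_sensitive/highest_risk state is replaced by partitioning the indicators into three risk tiers once and doing short-circuit tiered scans (High, then Medium, then Low) with no mutable state.
import Mathlib
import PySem

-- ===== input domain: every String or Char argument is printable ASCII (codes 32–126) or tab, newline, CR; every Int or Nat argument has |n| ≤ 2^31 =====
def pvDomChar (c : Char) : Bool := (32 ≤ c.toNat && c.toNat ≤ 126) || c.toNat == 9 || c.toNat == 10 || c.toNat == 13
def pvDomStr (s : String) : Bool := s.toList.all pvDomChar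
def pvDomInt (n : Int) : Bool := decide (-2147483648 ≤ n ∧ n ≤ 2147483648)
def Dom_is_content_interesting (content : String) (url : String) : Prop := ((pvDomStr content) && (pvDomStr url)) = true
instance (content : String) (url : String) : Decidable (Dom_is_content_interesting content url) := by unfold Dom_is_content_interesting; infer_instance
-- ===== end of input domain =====

-- B replaces A's accumulator loop over (indicator, risk) pairs by tiered short-circuit scans
-- over the indicators partitioned by risk once (objective: simpler).

-- ===== PORT A =====
def aSkipPhrases : List String :=
  ["welcome to nginx", "it works!", "apache http server", "index of /",
   "directory listing for", "default web page", "<title>index of",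
   "404 not found", "403 forbidden", "forbidden"]

def aSensitiveIndicators : List (String × String) :=
  [("password", "High"), ("passwd", "High"), ("secret", "High"), ("api_key", "High"),
   ("token", "Medium"), ("database", "Medium"), ("mysql", "Medium"),
   ("postgresql", "Medium"), ("mongodb", "Medium"), ("connection", "Medium"),
   ("<?php", "High"), ("mysql_connect", "High"), ("mysqli_connect", "High"),
   ("pdo(", "Medium"), ("new mysqli", "Medium"),
   ("create table", "Medium"), ("insert into", "Medium"), ("select *", "Low")]

def aAlwaysInterestingExtensions : List String :=
  [".env", ".sql", ".log", ".bak", ".backup", ".config", ".key"]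

-- the `for ext in ...: if ext in url_lower: return True, 'High'` loop
def aExtLoop (ul : String) : List String → Bool
  | [] => false
  | e :: rest => if PySem.Str.isIn e ul then true else aExtLoop ul rest

-- the final accumulator loop with state (found_sensitive, highest_risk)
def aIndLoop (cl : String) : List (String × String) → Bool → String → Bool × String
  | [], found, highest => (found, highest)
  | (ind, risk) :: rest, found, highest =>
    if PySem.Str.isIn ind cl then
      if risk == "High" then (true, "High")
      else aIndLoop cl rest true
        (if risk == "Medium" && highest == "Low" then "Medium" else highest)
    else aIndLoop cl rest found highest

def is_content_interesting (content : String) (url : String) : Bool × String :=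
  let content_lower := PySem.Str.lower content
  if aSkipPhrases.any (fun p => PySem.Str.isIn p content_lower) then (false, "Low")
  else if PySem.Str.isIn "phpinfo()" content || PySem.Str.isIn "PHP Version" content
          || PySem.Str.isIn "<h1 class=\"p\">PHP Version" content then (true, "High")
  else if aExtLoop (PySem.Str.lower url) aAlwaysInterestingExtensions then (true, "High")
  else aIndLoop content_lower aSensitiveIndicators false "Low"

-- ===== PORT B =====
def bSkipPhrases : List String :=
  ["welcome to nginx", "it works!", "apache http server", "index of /",
   "directory listing for", "default web page", "<title>index of",
   "404 not found", "403 forbidden", "forbidden"]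

def bPhpMarkers : List String := ["phpinfo()", "PHP Version", "<h1 class=\"p\">PHP Version"]

def bExtensions : List String :=
  [".env", ".sql", ".log", ".bak", ".backup", ".config", ".key"]

def bHigh : List String :=
  ["password", "passwd", "secret", "api_key", "<?php", "mysql_connect", "mysqli_connect"]

def bMedium : List String :=
  ["token", "database", "mysql", "postgresql", "mongodb", "connection",
   "pdo(", "new mysqli", "create table", "insert into"]

def bLow : List String := ["select *"]

def containsAny (haystack : String) (needles : List String) : Bool :=
  needles.any (fun n => PySem.Str.isIn n haystack)

def is_content_interesting_alt (content : String) (url : String) : Bool × String :=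
  let content_lower := PySem.Str.lower content
  if containsAny content_lower bSkipPhrases then (false, "Low")
  else if containsAny content bPhpMarkers then (true, "High")
  else if containsAny (PySem.Str.lower url) bExtensions then (true, "High")
  else if containsAny content_lower bHigh then (true, "High")
  else if containsAny content_lower bMedium then (true, "Medium")
  else (containsAny content_lower bLow, "Low")

-- ===== PRECONDITION & SPEC =====
def Spec_is_content_interesting (content : String) (url : String) (out : Bool × String) : Prop := out = is_content_interesting_alt content url
instance (content : String) (url : String) (out : Bool × String) : Decidable (Spec_is_content_interesting content url out) := by unfold Spec_is_content_interesting; infer_instance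

-- ===== CLAIM (what is proved, stated in full; the proofs are below) =====
def Claim_equal_is_content_interesting : Prop := ∀ (content : String) (url : String), Dom_is_content_interesting content url → Spec_is_content_interesting content url (is_content_interesting content url)

-- ===== LEMMAS AND PROOFS =====

theorem aExtLoop_eq_any (ul : String) (l : List String) :
    aExtLoop ul l = l.any (fun e => PySem.Str.isIn e ul) := by
  induction l with
  | nil => simp [aExtLoop]
  | cons e rest ih => simp [aExtLoop, ih]

theorem aIndLoop_medium (cl : String) (l : List (String × String)) (found : Bool) :
    aIndLoop cl l found "Medium" =
      if l.any (fun p => p.2 == "High" && PySem.Str.isIn p.1 cl) then (true, "High")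
      else (found || l.any (fun p => PySem.Str.isIn p.1 cl), "Medium") := by
  induction l generalizing found with
  | nil => simp [aIndLoop]
  | cons p rest ih =>
    obtain ⟨ind, risk⟩ := p
    by_cases hin : PySem.Chars.isIn ind.toList cl.toList = true
    · by_cases hH : risk = "High"
      · subst hH; simp [aIndLoop, hin]
      · have hHb : (risk == "High") = false := by simp [hH]
        simp [aIndLoop, hin, ih]
        simp only [hHb, Bool.false_and, Bool.false_or]
        split_ifs <;> simp_all
    · simp only [Bool.not_eq_true] at hin
      simp [aIndLoop, ih]
      simp only [hin, Bool.and_false, Bool.false_or]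
      split_ifs <;> simp_all

theorem aIndLoop_low (cl : String) (l : List (String × String)) (found : Bool) :
    aIndLoop cl l found "Low" =
      if l.any (fun p => p.2 == "High" && PySem.Str.isIn p.1 cl) then (true, "High")
      else if l.any (fun p => p.2 == "Medium" && PySem.Str.isIn p.1 cl) then (true, "Medium")
      else (found || l.any (fun p => PySem.Str.isIn p.1 cl), "Low") := by
  induction l generalizing found with
  | nil => simp [aIndLoop]
  | cons p rest ih =>
    obtain ⟨ind, risk⟩ := p
    by_cases hin : PySem.Chars.isIn ind.toList cl.toList = true
    · by_cases hH : risk = "High"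
      · subst hH; simp [aIndLoop, hin]
      · have hHb : (risk == "High") = false := by simp [hH]
        by_cases hM : risk = "Medium"
        · subst hM
          simp [aIndLoop, hin, aIndLoop_medium]
          split_ifs with h1 h2 <;> simp_all
          rename_i hex
          obtain ⟨a, ha, hI⟩ := hex
          have hfalse := h1 a ha
          simp [hI] at hfalse
        · have hMb : (risk == "Medium") = false := by simp [hM]
          simp [aIndLoop, hin]
          simp only [hHb, hMb, Bool.false_and, Bool.false_or]
          split_ifs <;> simp_all
    · simp only [Bool.not_eq_true] at hin
      simp [aIndLoop, ih]
      simp only [hin, Bool.and_false, Bool.false_or]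
      split_ifs <;> simp_all

-- ===== VERDICT (by name: the statement is the Claim_ definition above) =====
theorem is_content_interesting_spec : Claim_equal_is_content_interesting := by
  intro content url _
  unfold Spec_is_content_interesting is_content_interesting is_content_interesting_alt
  simp only [aExtLoop_eq_any, aIndLoop_low]
  simp [aSkipPhrases, bSkipPhrases, bPhpMarkers, aAlwaysInterestingExtensions, bExtensions,
        aSensitiveIndicators, bHigh, bMedium, bLow, containsAny]
  split_ifs <;> simp_all
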